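-- pv_equiv track=rewrite | github.com/gurushida/finnegan | fart.py | tryToParseToken
-- ===== SOURCE A (Python) =====
-- def tryToParseToken(inputTokens, tokenData):
--     if len(inputTokens) == 0:
--         return None
--
--     bestResult = None;
--     for token in tokenData:
--         for alternative in tokenData[token]:
--             n = len(alternative)
--             if alternative == inputTokens[0:n]:
--                 if bestResult is None or n > bestResult[0]:
--                     bestResult = (n, token)
--
--     return bestResult
-- ===== SOURCE B (Python) =====
-- def tryToParseToken(inputTokens, tokenData):
--     if len(inputTokens) == 0:
--         return None
--     # Index every alternative once (first token owning it wins, like A's tie-break), then walk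
--     # the input's prefixes from longest candidate length down and return the first indexed one.
--     index = {}
--     maxLen = 0
--     for token, alternatives in tokenData.items():
--         for alternative in alternatives:
--             index.setdefault(tuple(alternative), token)
--             if len(alternative) > maxLen:
--                 maxLen = len(alternative)
--     for n in range(min(len(inputTokens), maxLen), -1, -1):
--         token = index.get(tuple(inputTokens[:n]))
--         if token is not None:
--             return (n, token)
--     return None
-- ===== Notes on version B (the rewrite author's own statement) =====
-- stated objective: alternative
-- what changed: Instead of scanning every alternative of every token and comparing each against the input prefix while keeping a running best, B builds a hash index from alternative-tuple to its first owning token in one pass and then walks the input's prefixes from the longest indexed alternative length down, returning at the first indexed prefix.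
import Mathlib
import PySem

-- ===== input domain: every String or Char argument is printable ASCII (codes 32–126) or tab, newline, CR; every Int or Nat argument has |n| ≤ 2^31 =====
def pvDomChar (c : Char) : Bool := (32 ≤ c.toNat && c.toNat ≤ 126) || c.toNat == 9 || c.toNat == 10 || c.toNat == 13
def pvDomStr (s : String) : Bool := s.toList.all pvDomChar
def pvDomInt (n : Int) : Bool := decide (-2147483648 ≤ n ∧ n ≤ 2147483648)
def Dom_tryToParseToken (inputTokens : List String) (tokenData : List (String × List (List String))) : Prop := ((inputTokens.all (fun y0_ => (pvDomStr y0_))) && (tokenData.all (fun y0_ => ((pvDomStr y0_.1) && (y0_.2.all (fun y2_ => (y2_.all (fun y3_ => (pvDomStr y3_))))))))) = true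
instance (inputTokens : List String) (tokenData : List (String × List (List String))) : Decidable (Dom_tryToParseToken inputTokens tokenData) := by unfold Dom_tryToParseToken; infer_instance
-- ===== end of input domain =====

-- B replaces A's best-so-far scan over all alternatives by a first-wins hash index of the
-- alternatives plus a longest-first walk over the input's prefixes (objective: alternative).


-- ===== PORT A =====
-- 'for token in tokenData' iterates the dict's keys; 'tokenData[token]' is the first-match
-- lookup in the association list (the getD [] branch is unreachable: the key comes from the list).
def tryToParseToken (inputTokens : List String) (tokenData : List (String × List (List String))) : Option (Int × String) :=
  if inputTokens.length = 0 then none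
  else
    (tokenData.map Prod.fst).foldl (fun bestResult token =>
      (((tokenData.find? (fun q => q.1 == token)).map Prod.snd).getD []).foldl
        (fun bestResult alternative =>
          let n : Int := alternative.length
          if alternative = PySem.List.slice inputTokens (some 0) (some n) then
            match bestResult with
            | none => some (n, token)
            | some b => if n > b.1 then some (n, token) else bestResult
          else bestResult) bestResult) none

-- ===== PORT B =====
-- index.setdefault(tuple(alternative), token) over all items, tracking maxLen alongside
def pvBuildIndex (tokenData : List (String × List (List String))) :
    PySem.Dict (List String) String × Nat :=
  tokenData.foldl (fun st p =>
    p.2.foldl (fun st alternative =>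
      (st.1.setdefault alternative p.1,
       if alternative.length > st.2 then alternative.length else st.2)) st)
    (PySem.Dict.empty, 0)

-- 'for n in range(len(inputTokens), -1, -1): … index.get(tuple(inputTokens[:n]))';
-- inputTokens[:n] with 0 ≤ n is exactly List.take n
def pvScanDown (inputTokens : List String) (idx : PySem.Dict (List String) String) : Nat → Option (Int × String)
  | 0 =>
    match idx.get? (inputTokens.take 0) with
    | some t => some ((0 : Int), t)
    | none => none
  | n + 1 =>
    match idx.get? (inputTokens.take (n + 1)) with
    | some t => some (((n : Int) + 1, t))
    | none => pvScanDown inputTokens idx n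

def tryToParseToken_alt (inputTokens : List String) (tokenData : List (String × List (List String))) : Option (Int × String) :=
  if inputTokens.length = 0 then none
  else
    let st := pvBuildIndex tokenData
    pvScanDown inputTokens st.1 (min inputTokens.length st.2)

-- ===== PRECONDITION & SPEC =====
-- Pre_ excludes association lists with duplicate keys: those represent no Python dict (the dict
-- collapses duplicates before tryToParseToken runs), and A's key-iteration-with-lookup and B's
-- pair-iteration are only dict-equivalent on duplicate-free lists.
def Pre_tryToParseToken (inputTokens : List String) (tokenData : List (String × List (List String))) : Prop :=
  (tokenData.map Prod.fst).Nodup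
instance (inputTokens : List String) (tokenData : List (String × List (List String))) : Decidable (Pre_tryToParseToken inputTokens tokenData) := by unfold Pre_tryToParseToken; infer_instance

def pvWitness_tryToParseToken : List String × (List (String × List (List String))) :=
  (["hello"], [("T", [["hello"]])])

def Spec_tryToParseToken (inputTokens : List String) (tokenData : List (String × List (List String))) (out : Option (Int × String)) : Prop := out = tryToParseToken_alt inputTokens tokenData
instance (inputTokens : List String) (tokenData : List (String × List (List String))) (out : Option (Int × String)) : Decidable (Spec_tryToParseToken inputTokens tokenData out) := by unfold Spec_tryToParseToken; infer_instance

-- ===== CLAIM (what is proved, stated in full; the proofs are below) =====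
def Claim_equal_tryToParseToken : Prop := ∀ (inputTokens : List String) (tokenData : List (String × List (List String))), Dom_tryToParseToken inputTokens tokenData → Pre_tryToParseToken inputTokens tokenData → Spec_tryToParseToken inputTokens tokenData (tryToParseToken inputTokens tokenData)

-- ===== LEMMAS AND PROOFS =====

-- A's update of the running best, as a binary merge (left = earlier, ties keep the left)
def pvMerge (b r : Option (Int × String)) : Option (Int × String) :=
  match r with
  | none => b
  | some r' =>
    match b with
    | none => some r'
    | some b' => if r'.1 > b'.1 then some r' else some b'

def pvMatchOpt (inputTokens : List String) (q : List String × String) : Option (Int × String) :=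
  if q.1 = inputTokens.take q.1.length then some ((q.1.length : Int), q.2) else none

def pvScanP (inputTokens : List String) : List (List String × String) → Option (Int × String)
  | [] => none
  | q :: rest => pvMerge (pvMatchOpt inputTokens q) (pvScanP inputTokens rest)

def pvPairs (tokenData : List (String × List (List String))) : List (List String × String) :=
  tokenData.flatMap (fun p => p.2.map (fun a => (a, p.1)))

-- generic longest-first scan over an abstract prefix oracle
def pvScanG (f : Nat → Option String) : Nat → Option (Int × String)
  | 0 =>
    match f 0 with
    | some t => some ((0 : Int), t)
    | none => none
  | n + 1 =>
    match f (n + 1) with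
    | some t => some (((n : Int) + 1, t))
    | none => pvScanG f n

theorem pvMerge_none_left (r : Option (Int × String)) : pvMerge none r = r := by
  cases r <;> rfl

theorem pvMerge_assoc (a b c : Option (Int × String)) :
    pvMerge (pvMerge a b) c = pvMerge a (pvMerge b c) := by
  cases a with
  | none => cases b <;> cases c <;> simp only [pvMerge] <;> split_ifs <;> rfl
  | some a' =>
    cases b with
    | none => cases c <;> simp only [pvMerge]
    | some b' =>
      cases c with
      | none => simp only [pvMerge]
      | some c' =>
        simp only [pvMerge]
        by_cases h1 : b'.1 > a'.1 <;> by_cases h2 : c'.1 > b'.1 <;>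
          simp only [h1, h2, if_pos, if_false] <;> split_ifs <;> first | rfl | omega

theorem pvScanP_append (inputTokens : List String) (xs ys : List (List String × String)) :
    pvScanP inputTokens (xs ++ ys) = pvMerge (pvScanP inputTokens xs) (pvScanP inputTokens ys) := by
  induction xs with
  | nil => simp [pvScanP, pvMerge_none_left]
  | cons q rest ih => simp [pvScanP, ih, pvMerge_assoc]

theorem pvFind_self {l : List (String × List (List String))} {p : String × List (List String)}
    (hmem : p ∈ l) (hnd : (l.map Prod.fst).Nodup) :
    l.find? (fun q => q.1 == p.1) = some p := by
  induction l with
  | nil => cases hmem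
  | cons x rest ih =>
    simp only [List.map_cons, List.nodup_cons] at hnd
    rcases List.mem_cons.mp hmem with h | h
    · subst h; rw [List.find?_cons_of_pos (by simp)]
    · have hne : x.1 ≠ p.1 := by
        intro he
        exact hnd.1 (he ▸ List.mem_map_of_mem h)
      rw [List.find?_cons_of_neg (by simp [hne])]
      exact ih h hnd.2

-- the inner alternatives loop of A, as a scan over its (alternative, token) pairs
theorem pvInnerA (inputTokens : List String) (t : String) (alts : List (List String))
    (b : Option (Int × String)) :
    alts.foldl (fun bestResult alternative =>
      let n : Int := alternative.length
      if alternative = PySem.List.slice inputTokens (some 0) (some n) then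
        match bestResult with
        | none => some (n, t)
        | some bb => if n > bb.1 then some (n, t) else bestResult
      else bestResult) b
    = pvMerge b (pvScanP inputTokens (alts.map (fun a => (a, t)))) := by
  induction alts generalizing b with
  | nil => simp [pvScanP, pvMerge]
  | cons a rest ih =>
    simp only [List.foldl_cons, List.map_cons, pvScanP, ih, ← pvMerge_assoc]
    congr 1
    have hsl : PySem.List.slice inputTokens (some 0) (some ((a.length : Nat) : Int))
        = inputTokens.take a.length := by
      rw [PySem.List.slice_zero_start, PySem.List.slice_to_natCast]
    simp only [hsl, pvMatchOpt, pvMerge]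
    split_ifs with h
    · cases b with
      | none => rfl
      | some bb => rfl
    · cases b <;> rfl

-- A (past its empty-input guard, with the lookup resolved) is the pair scan
theorem pvA_eq_scanP (inputTokens : List String) (tokenData : List (String × List (List String)))
    (hnd : (tokenData.map Prod.fst).Nodup) :
    tryToParseToken inputTokens tokenData
    = if inputTokens.length = 0 then none
      else pvScanP inputTokens (pvPairs tokenData) := by
  unfold tryToParseToken
  split_ifs with h0
  · rfl
  have hlk : ∀ b p, p ∈ tokenData →
      (((tokenData.find? (fun q => q.1 == p.1)).map Prod.snd).getD []).foldl
        (fun bestResult alternative =>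
          let n : Int := alternative.length
          if alternative = PySem.List.slice inputTokens (some 0) (some n) then
            match bestResult with
            | none => some (n, p.1)
            | some bb => if n > bb.1 then some (n, p.1) else bestResult
          else bestResult) b
      = pvMerge b (pvScanP inputTokens (p.2.map (fun a => (a, p.1)))) := by
    intro b p hp
    rw [pvFind_self hp hnd]
    exact pvInnerA inputTokens p.1 p.2 b
  rw [List.foldl_map]
  have hmain : ∀ (l : List (String × List (List String))), (∀ p ∈ l, p ∈ tokenData) →
      ∀ b, l.foldl (fun bestResult p =>
        (((tokenData.find? (fun q => q.1 == p.1)).map Prod.snd).getD []).foldl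
          (fun bestResult alternative =>
            let n : Int := alternative.length
            if alternative = PySem.List.slice inputTokens (some 0) (some n) then
              match bestResult with
              | none => some (n, p.1)
              | some bb => if n > bb.1 then some (n, p.1) else bestResult
            else bestResult) bestResult) b
      = pvMerge b (pvScanP inputTokens (pvPairs l)) := by
    intro l
    induction l with
    | nil => intro _ b; simp [pvPairs, pvScanP, pvMerge]
    | cons p rest ih =>
      intro hsub b
      simp only [List.foldl_cons]
      rw [hlk b p (hsub p (List.mem_cons_self ..)),
          ih (fun q hq => hsub q (List.mem_cons_of_mem _ hq))]
      simp only [pvPairs, List.flatMap_cons, pvScanP_append, ← pvMerge_assoc]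
  rw [hmain tokenData (fun _ h => h) none, pvMerge_none_left]

-- the index lookup is the first matching pair
theorem pvIdx_foldl (k : List String) :
    ∀ (ps : List (List String × String)) (d : PySem.Dict (List String) String),
    (ps.foldl (fun d q => d.setdefault q.1 q.2) d).get? k
      = (d.get? k).or ((ps.find? (fun q => q.1 == k)).map Prod.snd) := by
  intro ps
  induction ps with
  | nil => intro d; simp
  | cons q rest ih =>
    intro d
    simp only [List.foldl_cons, ih]
    by_cases hk : q.1 = k
    · subst hk
      rw [List.find?_cons_of_pos (by simp), PySem.Dict.get?_setdefault_self]
      cases d.get? q.1 <;> simp [Option.getD, Option.or]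
    · have hne : k ≠ q.1 := fun h => hk h.symm
      rw [List.find?_cons_of_neg (by simp [hk]), PySem.Dict.get?_setdefault_of_ne d q.2 hne]

theorem pvBuildIndex_fst (tokenData : List (String × List (List String))) (k : List String) :
    (pvBuildIndex tokenData).1.get? k
      = ((pvPairs tokenData).find? (fun q => q.1 == k)).map Prod.snd := by
  unfold pvBuildIndex
  have h : ∀ (l : List (String × List (List String)))
      (st : PySem.Dict (List String) String × Nat),
      (l.foldl (fun st p =>
        p.2.foldl (fun st alternative =>
          (st.1.setdefault alternative p.1,
           if alternative.length > st.2 then alternative.length else st.2)) st) st).1.get? k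
      = (st.1.get? k).or (((pvPairs l).find? (fun q => q.1 == k)).map Prod.snd) := by
    intro l
    induction l with
    | nil => intro st; simp [pvPairs]
    | cons p rest ih =>
      intro st
      simp only [List.foldl_cons]
      rw [ih]
      have hin : ∀ (alts : List (List String)) (st : PySem.Dict (List String) String × Nat),
          (alts.foldl (fun st alternative =>
            (st.1.setdefault alternative p.1,
             if alternative.length > st.2 then alternative.length else st.2)) st).1
          = (alts.map (fun a => (a, p.1))).foldl (fun d q => d.setdefault q.1 q.2) st.1 := by
        intro alts
        induction alts with
        | nil => intro st; rfl
        | cons a as ihin => intro st; simp only [List.foldl_cons, List.map_cons, ihin]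
      rw [hin, pvIdx_foldl]
      simp only [pvPairs, List.flatMap_cons, List.find?_append, Option.map_or, Option.or_assoc]
  rw [h, PySem.Dict.get?_empty, Option.none_or]

-- every indexed alternative is no longer than the tracked maximum
theorem pvBuildIndex_snd (tokenData : List (String × List (List String))) :
    ∀ q ∈ pvPairs tokenData, q.1.length ≤ (pvBuildIndex tokenData).2 := by
  unfold pvBuildIndex
  have hin : ∀ (alts : List (List String)) (t : String)
      (st : PySem.Dict (List String) String × Nat),
      st.2 ≤ (alts.foldl (fun st alternative =>
        (st.1.setdefault alternative t,
         if alternative.length > st.2 then alternative.length else st.2)) st).2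
      ∧ ∀ a ∈ alts, a.length ≤ (alts.foldl (fun st alternative =>
        (st.1.setdefault alternative t,
         if alternative.length > st.2 then alternative.length else st.2)) st).2 := by
    intro alts t
    induction alts with
    | nil => intro st; exact ⟨le_rfl, by simp⟩
    | cons a as ihin =>
      intro st
      simp only [List.foldl_cons]
      obtain ⟨hmono, hall⟩ := ihin
        ((st.1.setdefault a t, if a.length > st.2 then a.length else st.2))
      refine ⟨le_trans (by split_ifs <;> omega) hmono, ?_⟩
      intro x hx
      rcases List.mem_cons.mp hx with h | h
      · subst h; exact le_trans (by split_ifs <;> omega) hmono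
      · exact hall x h
  have h : ∀ (l : List (String × List (List String)))
      (st : PySem.Dict (List String) String × Nat),
      st.2 ≤ (l.foldl (fun st p =>
        p.2.foldl (fun st alternative =>
          (st.1.setdefault alternative p.1,
           if alternative.length > st.2 then alternative.length else st.2)) st) st).2
      ∧ ∀ q ∈ pvPairs l, q.1.length ≤ (l.foldl (fun st p =>
        p.2.foldl (fun st alternative =>
          (st.1.setdefault alternative p.1,
           if alternative.length > st.2 then alternative.length else st.2)) st) st).2 := by
    intro l
    induction l with
    | nil => intro st; exact ⟨le_rfl, by simp [pvPairs]⟩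
    | cons p rest ihl =>
      intro st
      simp only [List.foldl_cons]
      obtain ⟨hmono, hall⟩ := ihl (p.2.foldl (fun st alternative =>
          (st.1.setdefault alternative p.1,
           if alternative.length > st.2 then alternative.length else st.2)) st)
      obtain ⟨hm1, ha1⟩ := hin p.2 p.1 st
      refine ⟨le_trans hm1 hmono, ?_⟩
      intro q hq
      simp only [pvPairs, List.flatMap_cons, List.mem_append] at hq
      rcases hq with h | h
      · obtain ⟨a, ha, rfl⟩ := List.mem_map.mp h
        exact le_trans (ha1 a ha) hmono
      · exact hall q h
  intro q hq
  exact (h tokenData (PySem.Dict.empty, 0)).2 q hq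

theorem pvScanDown_eq_scanG (inputTokens : List String) (idx : PySem.Dict (List String) String) :
    ∀ n, pvScanDown inputTokens idx n = pvScanG (fun k => idx.get? (inputTokens.take k)) n
  | 0 => rfl
  | n + 1 => by
    simp only [pvScanDown, pvScanG]
    cases idx.get? (inputTokens.take (n + 1)) with
    | some t => rfl
    | none => exact pvScanDown_eq_scanG inputTokens idx n

theorem pvScanG_congr {f g : Nat → Option String} :
    ∀ {n}, (∀ k ≤ n, f k = g k) → pvScanG f n = pvScanG g n := by
  intro n
  induction n with
  | zero => intro h; simp only [pvScanG, h 0 le_rfl]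
  | succ n ih =>
    intro h
    simp only [pvScanG, h (n + 1) le_rfl]
    cases g (n + 1) with
    | some t => rfl
    | none => exact ih fun k hk => h k (Nat.le_succ_of_le hk)

theorem pvScanG_none {f : Nat → Option String} :
    ∀ {n}, (∀ k ≤ n, f k = none) → pvScanG f n = none := by
  intro n
  induction n with
  | zero => intro h; simp only [pvScanG, h 0 le_rfl]
  | succ n ih =>
    intro h
    simp only [pvScanG, h (n + 1) le_rfl]
    exact ih fun k hk => h k (Nat.le_succ_of_le hk)

theorem pvScanG_bound {f : Nat → Option String} :
    ∀ {n}, pvScanG f n = none ∨ ∃ j t, j ≤ n ∧ pvScanG f n = some ((j : Int), t) := by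
  intro n
  induction n with
  | zero =>
    simp only [pvScanG]
    cases f 0 with
    | none => exact Or.inl rfl
    | some t => exact Or.inr ⟨0, t, le_rfl, rfl⟩
  | succ n ih =>
    simp only [pvScanG]
    cases f (n + 1) with
    | some t => exact Or.inr ⟨n + 1, t, le_rfl, by push_cast; rfl⟩
    | none =>
      rcases ih with h | ⟨j, t, hj, h⟩
      · exact Or.inl h
      · exact Or.inr ⟨j, t, Nat.le_succ_of_le hj, h⟩

theorem pvScanG_drop {f : Nat → Option String} {m : Nat} :
    ∀ {n}, m ≤ n → (∀ k, m < k → k ≤ n → f k = none) → pvScanG f n = pvScanG f m := by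
  intro n
  induction n with
  | zero => intro hm _; interval_cases m; rfl
  | succ n ih =>
    intro hm hnone
    by_cases he : m = n + 1
    · subst he; rfl
    · have hm' : m ≤ n := by omega
      simp only [pvScanG, hnone (n + 1) (by omega) le_rfl]
      exact ih hm' fun k h1 h2 => hnone k h1 (by omega)

theorem pvScanG_update {f g : Nat → Option String} {j : Nat} {t : String} :
    ∀ {n}, j ≤ n → f j = some t → (∀ k ≤ n, k ≠ j → f k = g k) →
    pvScanG f n = pvMerge (some ((j : Int), t)) (pvScanG g n) := by
  intro n
  induction n with
  | zero =>
    intro hj hfj hcong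
    interval_cases j
    simp only [pvScanG, hfj]
    cases hg : g 0 with
    | none => simp [pvMerge]
    | some u => simp [pvMerge]
  | succ n ih =>
    intro hj hfj hcong
    by_cases hje : j = n + 1
    · subst hje
      simp only [pvScanG, hfj]
      cases hg : g (n + 1) with
      | some u =>
        simp only [pvMerge]
        rw [if_neg (by push_cast; omega)]
        push_cast
        rfl
      | none =>
        rcases (pvScanG_bound (f := g) (n := n)) with h | ⟨j', t', hj', h⟩
        · rw [h]; simp only [pvMerge]; push_cast; rfl
        · rw [h]; simp only [pvMerge]
          rw [if_neg (by push_cast; omega)]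
          push_cast
          rfl
    · have hjn : j ≤ n := by omega
      have hf : f (n + 1) = g (n + 1) := hcong (n + 1) le_rfl (fun h => hje h.symm)
      simp only [pvScanG, hf]
      cases hg : g (n + 1) with
      | some u =>
        simp only [pvMerge]
        rw [if_pos (by push_cast; omega)]
      | none => exact ih hjn hfj fun k hk => hcong k (Nat.le_succ_of_le hk)

-- a matching pair's length is at most the input length
theorem pvMatch_len_le {inputTokens a : List String} (h : a = inputTokens.take a.length) :
    a.length ≤ inputTokens.length := by
  have := congrArg List.length h
  simp [List.length_take] at this
  omega

-- if a = inputTokens.take k with k ≤ len, then k = a.length (so a matches)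
theorem pvTake_len {inputTokens a : List String} {k : Nat} (hk : k ≤ inputTokens.length)
    (h : a = inputTokens.take k) : a.length = k := by
  have := congrArg List.length h
  simp [List.length_take] at this
  omega

-- the pair scan equals the longest-first prefix scan against the first-match oracle
theorem pvScanP_eq_scanG (inputTokens : List String) :
    ∀ ps : List (List String × String),
    pvScanP inputTokens ps
      = pvScanG (fun k => (ps.find? (fun q => q.1 == inputTokens.take k)).map Prod.snd)
          inputTokens.length := by
  intro ps
  induction ps with
  | nil => exact (pvScanG_none fun k _ => by simp).symm
  | cons q rest ih =>
    by_cases hq : q.1 = inputTokens.take q.1.length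
    · have hle : q.1.length ≤ inputTokens.length := pvMatch_len_le hq
      have hstep : ∀ k ≤ inputTokens.length, k ≠ q.1.length →
          ((q :: rest).find? (fun p => p.1 == inputTokens.take k)).map Prod.snd
          = (rest.find? (fun p => p.1 == inputTokens.take k)).map Prod.snd := by
        intro k hk hne
        rw [List.find?_cons_of_neg (by
          simp only [beq_iff_eq, decide_eq_true_eq]
          intro h
          exact hne (pvTake_len hk h).symm)]
      have hhit : ((q :: rest).find? (fun p => p.1 == inputTokens.take q.1.length)).map Prod.snd
          = some q.2 := by
        rw [List.find?_cons_of_pos (by simpa using hq)]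
        rfl
      calc pvScanP inputTokens (q :: rest)
          = pvMerge (some ((q.1.length : Int), q.2)) (pvScanP inputTokens rest) := by
            simp only [pvScanP, pvMatchOpt, if_pos hq]
        _ = pvMerge (some ((q.1.length : Int), q.2))
              (pvScanG (fun k => (rest.find? (fun p => p.1 == inputTokens.take k)).map Prod.snd)
                inputTokens.length) := by rw [ih]
        _ = pvScanG (fun k => ((q :: rest).find? (fun p => p.1 == inputTokens.take k)).map Prod.snd)
              inputTokens.length := (pvScanG_update hle hhit hstep).symm
    · have hstep : ∀ k ≤ inputTokens.length,
          ((q :: rest).find? (fun p => p.1 == inputTokens.take k)).map Prod.snd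
          = (rest.find? (fun p => p.1 == inputTokens.take k)).map Prod.snd := by
        intro k hk
        rw [List.find?_cons_of_neg (by
          simp only [beq_iff_eq, decide_eq_true_eq]
          intro h
          exact hq (by rw [pvTake_len hk h]; exact h))]
      rw [pvScanG_congr fun k hk => hstep k hk]
      simp only [pvScanP, ih, pvMatchOpt, if_neg hq, pvMerge_none_left]

-- ===== VERDICT (by name: the statement is the Claim_ definition above) =====
theorem tryToParseToken_spec : Claim_equal_tryToParseToken := by
  intro inputTokens tokenData _hdom hpre
  unfold Spec_tryToParseToken tryToParseToken_alt
  rw [pvA_eq_scanP inputTokens tokenData hpre]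
  split_ifs with h0
  · rfl
  rw [pvScanDown_eq_scanG, pvScanP_eq_scanG]
  rw [pvScanG_congr (g := fun k => (pvBuildIndex tokenData).1.get? (inputTokens.take k))
        (fun k _ => (pvBuildIndex_fst tokenData (inputTokens.take k)).symm)]
  refine pvScanG_drop (Nat.min_le_left ..) ?_
  intro k h1 h2
  rw [pvBuildIndex_fst]
  rw [List.find?_eq_none.mpr ?_]
  · rfl
  intro q hq
  simp only [beq_iff_eq]
  intro hqk
  have hlen : q.1.length = k := by
    have := congrArg List.length hqk
    simp [List.length_take] at this
    omega
  have hM := pvBuildIndex_snd tokenData q hq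
  omega
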